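-- pv_equiv track=rewrite | github.com/DaltonCole/ProgramingProblems | facebook_hacker_cup/2021/round-1/a2/new_solution.py | non_recursion
-- ===== SOURCE A (Python) =====
-- MOD = 1000000007
--
-- def bad(left: str, right: str) -> bool:
--     if (left == 'X' and right == 'O') or (left == 'O' and right == 'X'):
--         return True
--     return False
--
-- def non_recursion(s: str) -> int:
--     total = 0
--     for i in range(len(s) - 1):
--         for j in range(i + 1, len(s)):
--             if i + 1 == j:
--                 num = 1 if 'XO' == (s[i] + s[j]) or 'OX' == (s[i] + s[j]) else 0
--                 if s[j] != 'F':
--                     right = s[j]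
--                 elif s[i] != 'F':
--                     right = s[i]
--                 else:
--                     right = ''
--             else:
--                 if right != '':
--                     if bad(right, s[j]):
--                         num = (num + 1) % MOD
--                 if s[j] != 'F':
--                     right = s[j]
--             total = (total + num) % MOD
--     return total
-- ===== SOURCE B (Python) =====
-- MOD = 1000000007
--
-- def non_recursion(s: str) -> int:
--     # Each opposite pair of consecutive non-'F' characters at positions (a, b)
--     # lies in exactly (a + 1) * (len(s) - b) windows [i, j]; sum those directly.
--     n = len(s)
--     total = 0
--     last = -1  # index of the most recent non-'F' character seen, -1 if none
--     for b, c in enumerate(s):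
--         if c != 'F':
--             if last >= 0:
--                 p = s[last]
--                 if (p == 'X' and c == 'O') or (p == 'O' and c == 'X'):
--                     total = (total + (last + 1) * (n - b)) % MOD
--             last = b
--     return total
-- ===== Notes on version B (the rewrite author's own statement) =====
-- stated objective: faster
-- what changed: Replaced the O(n^2) double loop over all windows by a single pass: each opposite pair of consecutive non-'F' characters at positions (a,b) is counted once with weight (a+1)*(n-b), the number of windows containing it.
import Mathlib
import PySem

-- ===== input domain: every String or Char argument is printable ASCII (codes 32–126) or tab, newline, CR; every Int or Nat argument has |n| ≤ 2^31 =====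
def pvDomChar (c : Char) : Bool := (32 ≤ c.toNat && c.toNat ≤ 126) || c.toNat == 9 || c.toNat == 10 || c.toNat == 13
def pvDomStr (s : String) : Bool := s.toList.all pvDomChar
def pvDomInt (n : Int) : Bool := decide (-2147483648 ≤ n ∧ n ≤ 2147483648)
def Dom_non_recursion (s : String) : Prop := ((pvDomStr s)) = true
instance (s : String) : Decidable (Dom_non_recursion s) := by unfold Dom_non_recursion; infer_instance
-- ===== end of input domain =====

-- B replaces A's O(n^2) loop over all windows by a single pass that counts each
-- opposite consecutive-non-'F' pair (a,b) once with weight (a+1)*(n-b).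

-- ===== PORT A =====
-- helper 'bad' of A, transliterated
def pvBadA (left right : Char) : Bool :=
  if (left = 'X' ∧ right = 'O') ∨ (left = 'O' ∧ right = 'X') then true else false

-- the body of A's inner loop; state = (total, num, right); 'right = none' models right == ''
def pvInnerA (cs : List Char) (i : Int) (st : Int × Int × Option Char) (j : Int) :
    Int × Int × Option Char :=
  let total := st.1
  let num := st.2.1
  let right := st.2.2
  let si := PySem.List.pyGetD cs i ' '
  let sj := PySem.List.pyGetD cs j ' '
  if i + 1 = j then
    -- "'XO' == s[i]+s[j] or 'OX' == s[i]+s[j]", stated on the two characters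
    let num : Int := if (si = 'X' ∧ sj = 'O') ∨ (si = 'O' ∧ sj = 'X') then 1 else 0
    let right : Option Char := if sj ≠ 'F' then some sj else if si ≠ 'F' then some si else none
    (PySem.Int.mod (total + num) 1000000007, num, right)
  else
    let num : Int :=
      match right with
      | some r => if pvBadA r sj then PySem.Int.mod (num + 1) 1000000007 else num
      | none => num
    let right : Option Char := if sj ≠ 'F' then some sj else right
    (PySem.Int.mod (total + num) 1000000007, num, right)

def non_recursion (s : String) : Int :=
  let cs := s.toList
  let n : Int := cs.length
  ((PySem.List.pyRange 0 (n - 1) 1).foldl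
    (fun st i => (PySem.List.pyRange (i + 1) n 1).foldl (pvInnerA cs i) st)
    (0, 0, none)).1

-- ===== PORT B =====
-- the body of B's loop; state = (total, last)
def pvStepB (cs : List Char) (n : Int) (st : Int × Int) (bc : Int × Char) : Int × Int :=
  let total := st.1
  let last := st.2
  let b := bc.1
  let c := bc.2
  if c ≠ 'F' then
    let total :=
      if 0 ≤ last then
        let p := PySem.List.pyGetD cs last ' '
        if (p = 'X' ∧ c = 'O') ∨ (p = 'O' ∧ c = 'X') then
          PySem.Int.mod (total + (last + 1) * (n - b)) 1000000007
        else total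
      else total
    (total, b)
  else (total, last)

def non_recursion_alt (s : String) : Int :=
  let cs := s.toList
  let n : Int := cs.length
  ((PySem.List.enumerate cs 0).foldl (pvStepB cs n) (0, -1)).1

-- ===== PRECONDITION & SPEC =====
def Spec_non_recursion (s : String) (out : Int) : Prop := out = non_recursion_alt s
instance (s : String) (out : Int) : Decidable (Spec_non_recursion s out) := by unfold Spec_non_recursion; infer_instance

-- ===== CLAIM (what is proved, stated in full; the proofs are below) =====
def Claim_equal_non_recursion : Prop := ∀ (s : String), Dom_non_recursion s → Spec_non_recursion s (non_recursion s)

-- ===== LEMMAS AND PROOFS =====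

-- Bool form of the opposite test
def pvOpp (p c : Char) : Bool := (p == 'X' && c == 'O') || (p == 'O' && c == 'X')

-- last non-'F' character (with its index) among positions [i, j) of cs
def pvLastNF (cs : List Char) (i j : Nat) : Option (Nat × Char) :=
  (List.range' i (j - i)).foldl
    (fun acc a =>
      match cs[a]? with
      | some c => if c = 'F' then acc else some (a, c)
      | none => acc) none

-- global mate of position b: index a of the pair (a,b), if b closes an opposite pair
def pvPairAt (cs : List Char) (b : Nat) : Option Nat :=
  match pvLastNF cs 0 b, cs[b]? with
  | some (a, p), some c => if pvOpp p c then some a else none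
  | _, _ => none

-- B's weight of position b
def pvContrib (cs : List Char) (n b : Nat) : Int :=
  match pvPairAt cs b with
  | some a => ((a : Int) + 1) * ((n : Int) - (b : Int))
  | none => 0

-- A's increment at step (i, b): 1 iff b closes a pair inside the window starting at i
def pvG (cs : List Char) (i b : Nat) : Int :=
  match pvLastNF cs i b, cs[b]? with
  | some (_, p), some c => if pvOpp p c then 1 else 0
  | _, _ => 0

-- A's num after processing window [i, J)
def pvC (cs : List Char) (i J : Nat) : Int := ∑ b ∈ Finset.Ico (i + 1) J, pvG cs i b

-- A's contribution of outer index i after the inner loop has run to K (exclusive)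
def pvW (cs : List Char) (i K : Nat) : Int := ∑ j ∈ Finset.Ico (i + 1) K, pvC cs i (j + 1)

-- B's 'last' variable after k steps
def pvLastIdx (cs : List Char) (k : Nat) : Int :=
  match pvLastNF cs 0 k with
  | some (a, _) => (a : Int)
  | none => -1

theorem pvMod_eq (x : Int) : PySem.Int.mod x 1000000007 = x % 1000000007 :=
  PySem.Int.mod_eq_emod_of_pos (by norm_num)

theorem pvIfOpp {α : Type} (p c : Char) (x y : α) :
    (if (p = 'X' ∧ c = 'O') ∨ (p = 'O' ∧ c = 'X') then x else y) = if pvOpp p c then x else y := by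
  by_cases h1 : p = 'X' <;> by_cases h2 : c = 'O' <;> by_cases h3 : p = 'O' <;>
    by_cases h4 : c = 'X' <;> simp [pvOpp, h1, h2, h3, h4]

theorem pvBadA_eq (p c : Char) : pvBadA p c = pvOpp p c := by
  rw [pvBadA, pvIfOpp]; cases pvOpp p c <;> simp

theorem pvOpp_F (p : Char) : pvOpp p 'F' = false := by
  have h1 : ('F' == 'O') = false := by decide
  have h2 : ('F' == 'X') = false := by decide
  simp [pvOpp, h1, h2]

theorem pvOpp_F_left (c : Char) : pvOpp 'F' c = false := by
  have h1 : ('F' == 'X') = false := by decide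
  have h2 : ('F' == 'O') = false := by decide
  simp [pvOpp, h1, h2]

theorem pvGetD_some (cs : List Char) (b : Nat) (h : b < cs.length) :
    PySem.List.pyGetD cs (b : Int) ' ' = cs[b] := by
  rw [PySem.List.pyGetD_natCast]; exact List.getD_eq_getElem cs ' ' h

theorem pvLastNF_of_le (cs : List Char) {i j : Nat} (h : j ≤ i) : pvLastNF cs i j = none := by
  simp [pvLastNF, Nat.sub_eq_zero_of_le h]

theorem pvLastNF_succ (cs : List Char) {i j : Nat} (h : i ≤ j) :
    pvLastNF cs i (j + 1) =
      match cs[j]? with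
      | some c => if c = 'F' then pvLastNF cs i j else some (j, c)
      | none => pvLastNF cs i j := by
  have hd : j + 1 - i = (j - i) + 1 := by omega
  have hr : List.range' i ((j - i) + 1) = List.range' i (j - i) ++ [i + 1 * (j - i)] :=
    List.range'_concat ..
  have hij : i + 1 * (j - i) = j := by omega
  rw [pvLastNF, hd, hr, hij, List.foldl_append]
  rw [pvLastNF]
  simp only [List.foldl_cons, List.foldl_nil]

theorem pvLastNF_sound (cs : List Char) (i : Nat) :
    ∀ j a p, pvLastNF cs i j = some (a, p) → i ≤ a ∧ a < j ∧ cs[a]? = some p ∧ p ≠ 'F' := by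
  intro j
  induction j with
  | zero => intro a p h; rw [pvLastNF_of_le cs (Nat.zero_le i)] at h; exact absurd h (by simp)
  | succ j ih =>
    intro a p h
    by_cases hij : i ≤ j
    · rw [pvLastNF_succ cs hij] at h
      cases hc : cs[j]? with
      | none => rw [hc] at h; dsimp only at h; obtain ⟨h1, h2, h3, h4⟩ := ih a p h; exact ⟨h1, by omega, h3, h4⟩
      | some c =>
        rw [hc] at h; dsimp only at h
        by_cases hF : c = 'F'
        · rw [if_pos hF] at h; obtain ⟨h1, h2, h3, h4⟩ := ih a p h; exact ⟨h1, by omega, h3, h4⟩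
        · rw [if_neg hF] at h
          simp only [Option.some.injEq, Prod.mk.injEq] at h
          exact ⟨by omega, by omega, by rw [← h.1, hc, h.2], by rw [← h.2]; exact hF⟩
    · rw [pvLastNF_of_le cs (by omega)] at h; exact absurd h (by simp)

theorem pvLastNF_restrict (cs : List Char) (i : Nat) :
    ∀ j, pvLastNF cs i j = (pvLastNF cs 0 j).bind (fun q => if i ≤ q.1 then some q else none) := by
  intro j
  induction j with
  | zero => rw [pvLastNF_of_le cs (Nat.zero_le i), pvLastNF_of_le cs (Nat.le_refl 0)]; rfl
  | succ j ih =>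
    by_cases hij : i ≤ j
    · rw [pvLastNF_succ cs hij, pvLastNF_succ cs (Nat.zero_le j)]
      cases hc : cs[j]? with
      | none => exact ih
      | some c =>
        dsimp only
        by_cases hF : c = 'F'
        · simp only [if_pos hF]; exact ih
        · simp only [if_neg hF, Option.bind_some, if_pos hij]
    · rw [pvLastNF_of_le cs (show j + 1 ≤ i by omega)]
      cases hq : pvLastNF cs 0 (j + 1) with
      | none => rfl
      | some q =>
        obtain ⟨-, h2, -, -⟩ := pvLastNF_sound cs 0 (j + 1) q.1 q.2 (by rw [hq])
        simp only [Option.bind_some, if_neg (show ¬ i ≤ q.1 by omega)]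

theorem pvG_eq (cs : List Char) (i b : Nat) :
    pvG cs i b =
      match pvPairAt cs b with
      | some a => if i ≤ a then 1 else 0
      | none => 0 := by
  rw [pvG, pvPairAt, pvLastNF_restrict]
  cases hq : pvLastNF cs 0 b with
  | none => cases hc : cs[b]? <;> rfl
  | some q =>
    obtain ⟨a, p⟩ := q
    simp only [Option.bind_some]
    by_cases hia : i ≤ a
    · rw [if_pos hia]
      cases hc : cs[b]? with
      | none => rfl
      | some c => dsimp only; by_cases ho : pvOpp p c = true <;> simp [ho, hia]
    · rw [if_neg hia]
      cases hc : cs[b]? with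
      | none => rfl
      | some c => dsimp only; by_cases ho : pvOpp p c = true <;> simp [ho, hia]

theorem pvPairAt_sound (cs : List Char) (b a : Nat) (h : pvPairAt cs b = some a) :
    a < b ∧ b < cs.length := by
  rw [pvPairAt] at h
  rcases hq : pvLastNF cs 0 b with _ | ⟨a', p⟩ <;> rw [hq] at h <;>
    rcases hc : cs[b]? with _ | c <;> rw [hc] at h <;> dsimp only at h
  · exact absurd h (by simp)
  · exact absurd h (by simp)
  · exact absurd h (by simp)
  · by_cases ho : pvOpp p c = true
    · rw [if_pos ho] at h
      simp only [Option.some.injEq] at h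
      obtain ⟨-, h2, -, -⟩ := pvLastNF_sound cs 0 b a' p hq
      exact ⟨h ▸ h2, (List.getElem?_eq_some_iff.mp hc).choose⟩
    · rw [if_neg ho] at h; exact absurd h (by simp)

-- pvG at the very first inner step equals A's initial num
theorem pvG_first (cs : List Char) (i : Nat) (hi : i + 1 < cs.length) :
    pvG cs i (i + 1) = if pvOpp cs[i] cs[i+1] then 1 else 0 := by
  have hlt : i < cs.length := by omega
  rw [pvG, pvLastNF_succ cs (Nat.le_refl i), pvLastNF_of_le cs (Nat.le_refl i)]
  rw [List.getElem?_eq_getElem hlt, List.getElem?_eq_getElem hi]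
  by_cases hF : cs[i] = 'F'
  · simp only [hF, pvOpp_F_left, if_true]; rfl
  · simp only [if_neg hF]

theorem pvC_succ (cs : List Char) (i K : Nat) (h : i + 1 ≤ K) :
    pvC cs i (K + 1) = pvC cs i K + pvG cs i K := by
  rw [pvC, pvC, Finset.sum_Ico_succ_top h]

theorem pvW_succ (cs : List Char) (i K : Nat) (h : i + 1 ≤ K) :
    pvW cs i (K + 1) = pvW cs i K + pvC cs i (K + 1) := by
  rw [pvW, pvW, Finset.sum_Ico_succ_top h]

theorem pvG_nonneg (cs : List Char) (i b : Nat) : 0 ≤ pvG cs i b ∧ pvG cs i b ≤ 1 := by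
  rw [pvG]
  rcases pvLastNF cs i b with _ | ⟨a, p⟩ <;> rcases cs[b]? with _ | c <;> dsimp only <;>
    constructor <;> (try split) <;> norm_num

-- pvOpp true forces the concrete characters
theorem pvOpp_true {p c : Char} (h : pvOpp p c = true) :
    (p = 'X' ∧ c = 'O') ∨ (p = 'O' ∧ c = 'X') := by
  rw [pvOpp, Bool.or_eq_true, Bool.and_eq_true, Bool.and_eq_true] at h
  simpa using h

theorem pvOpp_snd_ne_F {p c : Char} (h : pvOpp p c = true) : c ≠ 'F' := by
  rcases pvOpp_true h with ⟨-, rfl⟩ | ⟨-, rfl⟩ <;> decide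

-- ===== A's inner loop invariant =====
theorem pvInner_loop (cs : List Char) (i : Nat) (hi : i + 1 < cs.length) :
    ∀ (d : Nat), i + 1 + d + 1 ≤ cs.length → ∀ (t nm : Int) (r : Option Char),
    (PySem.List.pyRange ((i : Int) + 1) ((i : Int) + 1 + (d : Int) + 1) 1).foldl
        (pvInnerA cs (i : Int)) (t, nm, r)
      = ((t + pvW cs i (i + 1 + d + 1)) % 1000000007,
         pvC cs i (i + 1 + d + 1) % 1000000007,
         (pvLastNF cs i (i + 1 + d + 1)).map Prod.snd) := by
  intro d
  induction d with
  | zero =>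
    intro hlen t nm r
    have hb : ((i : Int) + 1 + ((0 : Nat) : Int) + 1) = ((i : Int) + 1) + 1 := by push_cast; ring
    rw [hb, PySem.List.pyRange_one_singleton]
    simp only [List.foldl_cons, List.foldl_nil]
    have hii : i < cs.length := by omega
    have hgi : PySem.List.pyGetD cs (i : Int) ' ' = cs[i] := pvGetD_some cs i hii
    have hgj : PySem.List.pyGetD cs ((i : Int) + 1) ' ' = cs[i + 1] := by
      have hc : ((i : Int) + 1) = (((i + 1 : Nat)) : Int) := by push_cast; ring
      rw [hc]; exact pvGetD_some cs (i + 1) hi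
    rw [pvInnerA]
    dsimp only
    rw [if_pos rfl, hgi, hgj, pvIfOpp]
    have hz : i + 1 + 0 + 1 = i + 1 + 1 := by omega
    rw [hz]
    have hGf := pvG_first cs i hi
    have hC1 : pvC cs i (i + 1 + 1) = pvG cs i (i + 1) := by
      rw [pvC, Finset.sum_Ico_succ_top (Nat.le_refl _), Finset.Ico_self, Finset.sum_empty,
        zero_add]
    have hW1 : pvW cs i (i + 1 + 1) = pvC cs i (i + 1 + 1) := by
      rw [pvW, Finset.sum_Ico_succ_top (Nat.le_refl _), Finset.Ico_self, Finset.sum_empty,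
        zero_add]
    have hL1 : pvLastNF cs i (i + 1) = if cs[i] = 'F' then none else some (i, cs[i]) := by
      rw [pvLastNF_succ cs (Nat.le_refl i), List.getElem?_eq_getElem hii,
        pvLastNF_of_le cs (Nat.le_refl i)]
    have hL2 : pvLastNF cs i (i + 1 + 1)
        = if cs[i + 1] = 'F' then pvLastNF cs i (i + 1) else some (i + 1, cs[i + 1]) := by
      rw [pvLastNF_succ cs (by omega), List.getElem?_eq_getElem hi]
      rfl
    have hm : pvG cs i (i + 1) % 1000000007 = pvG cs i (i + 1) := by
      have hbnd := pvG_nonneg cs i (i + 1)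
      omega
    simp only [Prod.mk.injEq]
    refine ⟨?_, ?_, ?_⟩
    · rw [pvMod_eq, hW1, hC1, hGf]
      rfl
    · rw [hC1, hm, hGf]
      rfl
    · rw [hL2, hL1]
      by_cases hF1 : cs[i + 1] = 'F' <;> by_cases hF0 : cs[i] = 'F' <;>
        simp [hF1, hF0]
  | succ d ih =>
    intro hlen t nm r
    have hlen' : i + 1 + d + 1 ≤ cs.length := by omega
    have hb : ((i : Int) + 1 + (((d + 1) : Nat) : Int) + 1)
        = ((i : Int) + 1 + (d : Int) + 1) + 1 := by push_cast; ring
    rw [hb, PySem.List.pyRange_one_succ_right (by omega), List.foldl_append, ih hlen' t nm r]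
    simp only [List.foldl_cons, List.foldl_nil]
    have hKlt : i + 1 + d + 1 < cs.length := by omega
    have hjcast : ((i : Int) + 1 + (d : Int) + 1) = (((i + 1 + d + 1 : Nat)) : Int) := by
      push_cast; ring
    rw [pvInnerA]
    dsimp only
    rw [if_neg (by omega), hjcast, pvGetD_some cs (i + 1 + d + 1) hKlt]
    have hidx : i + 1 + (d + 1) + 1 = (i + 1 + d + 1) + 1 := by omega
    rw [hidx]
    have hCs : pvC cs i ((i + 1 + d + 1) + 1)
        = pvC cs i (i + 1 + d + 1) + pvG cs i (i + 1 + d + 1) := pvC_succ cs i _ (by omega)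
    have hWs : pvW cs i ((i + 1 + d + 1) + 1)
        = pvW cs i (i + 1 + d + 1) + pvC cs i ((i + 1 + d + 1) + 1) := pvW_succ cs i _ (by omega)
    have hLs : pvLastNF cs i ((i + 1 + d + 1) + 1)
        = if cs[i + 1 + d + 1] = 'F' then pvLastNF cs i (i + 1 + d + 1)
          else some (i + 1 + d + 1, cs[i + 1 + d + 1]) := by
      rw [pvLastNF_succ cs (by omega), List.getElem?_eq_getElem hKlt]
    cases hq : pvLastNF cs i (i + 1 + d + 1) with
    | none =>
      have hg0 : pvG cs i (i + 1 + d + 1) = 0 := by rw [pvG, hq]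
      dsimp only [Option.map]
      simp only [Prod.mk.injEq]
      refine ⟨?_, ?_, ?_⟩
      · rw [pvMod_eq, hWs, hCs, hg0]; omega
      · rw [hCs, hg0]; omega
      · rw [hLs]
        by_cases hF : cs[i + 1 + d + 1] = 'F' <;> simp [hF, hq]
    | some q =>
      obtain ⟨a, p⟩ := q
      have hg : pvG cs i (i + 1 + d + 1) = if pvOpp p cs[i + 1 + d + 1] then 1 else 0 := by
        rw [pvG, hq, List.getElem?_eq_getElem hKlt]
      dsimp only [Option.map]
      rw [pvBadA_eq]
      simp only [Prod.mk.injEq]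
      by_cases ho : pvOpp p cs[i + 1 + d + 1] = true
      · have hFne : cs[i + 1 + d + 1] ≠ 'F' := pvOpp_snd_ne_F ho
        have hg1 : pvG cs i (i + 1 + d + 1) = 1 := by rw [hg, if_pos ho]
        rw [if_pos ho]
        refine ⟨?_, ?_, ?_⟩
        · rw [pvMod_eq, pvMod_eq, hWs, hCs, hg1]; omega
        · rw [pvMod_eq, hCs, hg1]; omega
        · rw [hLs, if_neg hFne, if_pos hFne]
      · have hg0' : pvG cs i (i + 1 + d + 1) = 0 := by rw [hg, if_neg ho]
        rw [if_neg ho]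
        refine ⟨?_, ?_, ?_⟩
        · rw [pvMod_eq, hWs, hCs, hg0']; omega
        · rw [hCs, hg0']; omega
        · rw [hLs]
          by_cases hF : cs[i + 1 + d + 1] = 'F' <;> simp [hF, hq]

-- ===== A's outer loop invariant =====
theorem pvOuter_loop (cs : List Char) :
    ∀ (I : Nat), I + 1 ≤ cs.length →
    ∃ nm r,
      (PySem.List.pyRange 0 (I : Int) 1).foldl
        (fun st i => (PySem.List.pyRange (i + 1) (cs.length : Int) 1).foldl (pvInnerA cs i) st)
        (0, 0, none)
      = ((∑ i ∈ Finset.range I, pvW cs i cs.length) % 1000000007, nm, r) := by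
  intro I
  induction I with
  | zero =>
    intro _
    refine ⟨0, none, ?_⟩
    rw [Nat.cast_zero, PySem.List.pyRange_one_eq_nil (Int.le_refl 0)]
    simp
  | succ I ih =>
    intro hI
    obtain ⟨nm, r, hfold⟩ := ih (by omega)
    have hb : (((I + 1) : Nat) : Int) = (I : Int) + 1 := by push_cast; ring
    rw [hb, PySem.List.pyRange_one_succ_right (Int.natCast_nonneg I), List.foldl_append, hfold]
    simp only [List.foldl_cons, List.foldl_nil]
    have hd : (cs.length : Int) = (I : Int) + 1 + ((cs.length - I - 2 : Nat) : Int) + 1 := by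
      omega
    rw [hd, pvInner_loop cs I (by omega) (cs.length - I - 2) (by omega)]
    have hn : I + 1 + (cs.length - I - 2) + 1 = cs.length := by omega
    rw [hn]
    refine ⟨_, _, Prod.ext ?_ rfl⟩
    rw [Finset.sum_range_succ]
    dsimp only
    omega

theorem pvA_eq (s : String) :
    non_recursion s
      = (∑ i ∈ Finset.range (s.toList.length - 1), pvW s.toList i s.toList.length) % 1000000007 := by
  show ((PySem.List.pyRange 0 ((s.toList.length : Int) - 1) 1).foldl
      (fun st i => (PySem.List.pyRange (i + 1) (s.toList.length : Int) 1).foldl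
        (pvInnerA s.toList i) st) (0, 0, none)).1 = _
  rcases Nat.eq_zero_or_pos s.toList.length with h0 | hpos
  · rw [h0]
    rw [show ((0 : Nat) : Int) - 1 = -1 by norm_num,
      PySem.List.pyRange_one_eq_nil (by norm_num : (-1 : Int) ≤ 0)]
    simp
  · have hc : ((s.toList.length : Int) - 1) = (((s.toList.length - 1 : Nat)) : Int) := by omega
    rw [hc]
    obtain ⟨nm, r, h⟩ := pvOuter_loop s.toList (s.toList.length - 1) (by omega)
    rw [h]

-- contrib of a position holding 'F' is zero
theorem pvContrib_F (cs : List Char) (n b : Nat) (h : cs[b]? = some 'F') :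
    pvContrib cs n b = 0 := by
  rw [pvContrib, pvPairAt, h]
  rcases pvLastNF cs 0 b with _ | ⟨a, p⟩ <;> simp [pvOpp_F]

-- ===== B's loop invariant =====
theorem pvB_loop (cs : List Char) :
    ∀ (k : Nat), k ≤ cs.length →
    ((PySem.List.enumerate cs 0).take k).foldl (pvStepB cs (cs.length : Int)) (0, -1)
      = ((∑ b ∈ Finset.range k, pvContrib cs cs.length b) % 1000000007, pvLastIdx cs k) := by
  intro k
  induction k with
  | zero =>
    intro _
    simp [pvLastIdx, pvLastNF_of_le cs (Nat.le_refl 0)]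
  | succ k ih =>
    intro hk
    have hk' : k < cs.length := by omega
    have htake : (PySem.List.enumerate cs 0).take (k + 1)
        = (PySem.List.enumerate cs 0).take k ++ [((k : Int), cs[k])] := by
      rw [List.take_succ]
      congr 1
      rw [PySem.List.getElem?_enumerate, List.getElem?_eq_getElem hk']
      simp
    rw [htake, List.foldl_append, ih (by omega)]
    simp only [List.foldl_cons, List.foldl_nil]
    rw [Finset.sum_range_succ]
    rw [pvStepB]
    by_cases hF : cs[k] = 'F'
    · have hco : pvContrib cs cs.length k = 0 :=
        pvContrib_F cs cs.length k (by rw [List.getElem?_eq_getElem hk', hF])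
      have hli : pvLastIdx cs (k + 1) = pvLastIdx cs k := by
        rw [pvLastIdx, pvLastNF_succ cs (Nat.zero_le k), List.getElem?_eq_getElem hk', hF]
        simp [pvLastIdx]
      simp [hF, hco, hli]
    · have hli : pvLastIdx cs (k + 1) = (k : Int) := by
        rw [pvLastIdx, pvLastNF_succ cs (Nat.zero_le k), List.getElem?_eq_getElem hk']
        simp [hF]
      simp only [ne_eq, hF, not_false_eq_true, if_true]
      cases hq : pvLastNF cs 0 k with
      | none =>
        have hidx : pvLastIdx cs k = -1 := by rw [pvLastIdx, hq]
        have hco : pvContrib cs cs.length k = 0 := by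
          have hpa : pvPairAt cs k = none := by
            rw [pvPairAt, hq]
          rw [pvContrib, hpa]
        rw [hidx, hco, hli]
        norm_num
      | some q =>
        obtain ⟨a, p⟩ := q
        obtain ⟨-, hak, hap, -⟩ := pvLastNF_sound cs 0 k a p hq
        have hidx : pvLastIdx cs k = (a : Int) := by rw [pvLastIdx, hq]
        have halen : a < cs.length := by omega
        have hpa : cs[a] = p := by
          have h2 := List.getElem?_eq_getElem halen
          rw [h2] at hap; exact Option.some.inj hap
        rw [hidx]
        rw [if_pos (by positivity)]
        rw [pvGetD_some cs a halen, hpa, pvIfOpp]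
        have hpair : pvPairAt cs k = if pvOpp p cs[k] then some a else none := by
          rw [pvPairAt, hq, List.getElem?_eq_getElem hk']
        by_cases ho : pvOpp p cs[k] = true
        · have hco : pvContrib cs cs.length k = ((a : Int) + 1) * ((cs.length : Int) - (k : Int)) := by
            rw [pvContrib, hpair, if_pos ho]
          rw [if_pos ho, hco, hli, pvMod_eq]
          simp only [Prod.mk.injEq]
          exact ⟨by omega, trivial⟩
        · have hco : pvContrib cs cs.length k = 0 := by
            rw [pvContrib, hpair, if_neg ho]
          rw [if_neg ho, hco, hli]
          norm_num

theorem pvB_eq (s : String) :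
    non_recursion_alt s
      = (∑ b ∈ Finset.range s.toList.length, pvContrib s.toList s.toList.length b) % 1000000007 := by
  have htake : (PySem.List.enumerate s.toList 0).take s.toList.length
      = PySem.List.enumerate s.toList 0 := by
    rw [← PySem.List.length_enumerate s.toList (0 : Int)]
    exact List.take_length
  have h := pvB_loop s.toList s.toList.length (Nat.le_refl _)
  rw [htake] at h
  show ((PySem.List.enumerate s.toList 0).foldl (pvStepB s.toList (s.toList.length : Int)) (0, -1)).1
      = _
  rw [h]

-- ===== the counting identity: sum over windows = weighted sum over pairs =====
theorem pvFilter_le (n a : Nat) (h : a < n) :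
    (Finset.range n).filter (fun i => i ≤ a) = Finset.range (a + 1) := by
  ext x; simp only [Finset.mem_filter, Finset.mem_range]; omega

theorem pvFilter_Ico1 (i n j : Nat) (hj : j < n) :
    Finset.Ico (i + 1) (j + 1) = (Finset.Ico (i + 1) n).filter (fun b => b ≤ j) := by
  ext x; simp only [Finset.mem_filter, Finset.mem_Ico]; omega

theorem pvFilter_Ico2 (i n b : Nat) (hb : i + 1 ≤ b) :
    (Finset.Ico (i + 1) n).filter (fun j => b ≤ j) = Finset.Ico b n := by
  ext x; simp only [Finset.mem_filter, Finset.mem_Ico]; omega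

theorem pvFilter_Ico3 (i n : Nat) :
    Finset.Ico (i + 1) n = (Finset.range n).filter (fun b => i + 1 ≤ b) := by
  ext x; simp only [Finset.mem_filter, Finset.mem_range, Finset.mem_Ico]; omega

theorem pvW_weighted (cs : List Char) (i n : Nat) :
    pvW cs i n = ∑ b ∈ Finset.Ico (i + 1) n, ((n : Int) - (b : Int)) * pvG cs i b := by
  rw [pvW]
  have h1 : ∀ j ∈ Finset.Ico (i + 1) n,
      pvC cs i (j + 1) = ∑ b ∈ Finset.Ico (i + 1) n, if b ≤ j then pvG cs i b else 0 := by
    intro j hj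
    rw [pvC, pvFilter_Ico1 i n j (Finset.mem_Ico.mp hj).2, Finset.sum_filter]
  rw [Finset.sum_congr rfl h1, Finset.sum_comm]
  refine Finset.sum_congr rfl ?_
  intro b hb
  obtain ⟨hb1, hb2⟩ := Finset.mem_Ico.mp hb
  rw [← Finset.sum_filter, pvFilter_Ico2 i n b hb1, Finset.sum_const, Nat.card_Ico,
    nsmul_eq_mul]
  rw [Nat.cast_sub (Nat.le_of_lt hb2)]

theorem pvSum_swap (cs : List Char) :
    ∑ i ∈ Finset.range (cs.length - 1), pvW cs i cs.length
      = ∑ b ∈ Finset.range cs.length, pvContrib cs cs.length b := by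
  have step1 : ∑ i ∈ Finset.range (cs.length - 1), pvW cs i cs.length
      = ∑ i ∈ Finset.range (cs.length - 1), ∑ b ∈ Finset.range cs.length,
          if i + 1 ≤ b then ((cs.length : Int) - (b : Int)) * pvG cs i b else 0 := by
    refine Finset.sum_congr rfl ?_
    intro i _
    rw [pvW_weighted, pvFilter_Ico3, Finset.sum_filter]
  rw [step1]
  have step2 : ∑ i ∈ Finset.range (cs.length - 1), ∑ b ∈ Finset.range cs.length,
          (if i + 1 ≤ b then ((cs.length : Int) - (b : Int)) * pvG cs i b else 0)
      = ∑ i ∈ Finset.range cs.length, ∑ b ∈ Finset.range cs.length,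
          if i + 1 ≤ b then ((cs.length : Int) - (b : Int)) * pvG cs i b else 0 := by
    have hsub : Finset.range (cs.length - 1) ⊆ Finset.range cs.length := by
      intro x hx
      simp only [Finset.mem_range] at hx ⊢
      omega
    refine Finset.sum_subset hsub ?_
    intro i hi hni
    refine Finset.sum_eq_zero ?_
    intro b hb
    rw [if_neg]
    simp only [Finset.mem_range] at hi hb
    simp only [Finset.mem_range] at hni
    omega
  rw [step2, Finset.sum_comm]
  refine Finset.sum_congr rfl ?_
  intro b hb
  have hbn : b < cs.length := Finset.mem_range.mp hb
  cases hp : pvPairAt cs b with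
  | none =>
    have hg : ∀ i, pvG cs i b = 0 := by intro i; rw [pvG_eq, hp]
    rw [pvContrib, hp]
    refine Finset.sum_eq_zero ?_
    intro i _
    rw [hg, mul_zero, ite_self]
  | some a =>
    obtain ⟨hab, -⟩ := pvPairAt_sound cs b a hp
    have hg : ∀ i, pvG cs i b = if i ≤ a then 1 else 0 := by intro i; rw [pvG_eq, hp]
    have hterm : ∀ i ∈ Finset.range cs.length,
        (if i + 1 ≤ b then ((cs.length : Int) - (b : Int)) * pvG cs i b else 0)
          = if i ≤ a then ((cs.length : Int) - (b : Int)) else 0 := by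
      intro i _
      rw [hg]
      by_cases h1 : i ≤ a
      · rw [if_pos (by omega : i + 1 ≤ b), if_pos h1, if_pos h1, mul_one]
      · rw [if_neg h1, if_neg h1, mul_zero, ite_self]
    rw [Finset.sum_congr rfl hterm, ← Finset.sum_filter,
      pvFilter_le cs.length a (by omega), Finset.sum_const, Finset.card_range, nsmul_eq_mul,
      pvContrib, hp]
    push_cast
    ring

-- ===== VERDICT (by name: the statement is the Claim_ definition above) =====
theorem non_recursion_spec : Claim_equal_non_recursion := by
  intro s _
  unfold Spec_non_recursion
  rw [pvA_eq, pvB_eq, pvSum_swap]
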